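-- pv_equiv track=rewrite | github.com/cancerit/VaLiAnT | src/valiant/string_mutators.py | delete_non_overlapping_3_offset
-- ===== SOURCE A (Python) =====
-- from typing import List, Tuple, Set
--
-- def _delete_non_overlapping(seq: str, count: int, offset: int = 0) -> List[Tuple[int, str, str]]:
--     return [
--         (i, seq[i:i + count], seq[:i] + seq[i + count:])
--         for i in range(offset, count * ((len(seq) - offset) // count), count)
--     ]
--
-- def delete_non_overlapping_3(seq: str) -> List[Tuple[int, str, str]]:
--     return _delete_non_overlapping(seq, 3)
--
-- def delete_non_overlapping_3_offset(seq: str, start_offset: int, end_offset: int) -> List[Tuple[int, str, str]]: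
--     if start_offset < 0 or end_offset < 0:
--         raise ValueError("Invalid offset!")
--
--     if start_offset == 0 and end_offset == 0:
--         return delete_non_overlapping_3(seq)
--
--     prefix = seq[:start_offset]
--
--     if end_offset > 0:
--         suffix = seq[-end_offset:]
--         subseq = seq[start_offset:-end_offset]
--     else:
--         suffix = ''
--         subseq = seq[start_offset:]
--
--     return [
--         (i + start_offset, ref, f"{prefix}{mseq}{suffix}")
--         for i, ref, mseq in delete_non_overlapping_3(subseq)
--     ]
-- ===== SOURCE B (Python) =====
-- def delete_non_overlapping_3_offset(seq, start_offset, end_offset):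
--     if start_offset < 0 or end_offset < 0:
--         raise ValueError("Invalid offset!")
--     out = []
--     pref = seq[:start_offset]
--     rest = seq[start_offset:]
--     pos = start_offset
--     for _ in range(max(0, len(seq) - start_offset - end_offset) // 3):
--         trip = rest[:3]
--         out.append((pos, trip, pref + rest[3:]))
--         pref += trip
--         rest = rest[3:]
--         pos += 3
--     return out
-- ===== Notes on version B (the rewrite author's own statement) =====
-- stated objective: alternative
-- what changed: Replaces A's staged prefix/subseq/suffix decomposition and index-range list comprehension with a single sliding-window loop that consumes the string three characters at a time, maintaining an accumulated prefix, the remaining suffix and an output accumulator as state, never computing per-index slices of the original string.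
import Mathlib
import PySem

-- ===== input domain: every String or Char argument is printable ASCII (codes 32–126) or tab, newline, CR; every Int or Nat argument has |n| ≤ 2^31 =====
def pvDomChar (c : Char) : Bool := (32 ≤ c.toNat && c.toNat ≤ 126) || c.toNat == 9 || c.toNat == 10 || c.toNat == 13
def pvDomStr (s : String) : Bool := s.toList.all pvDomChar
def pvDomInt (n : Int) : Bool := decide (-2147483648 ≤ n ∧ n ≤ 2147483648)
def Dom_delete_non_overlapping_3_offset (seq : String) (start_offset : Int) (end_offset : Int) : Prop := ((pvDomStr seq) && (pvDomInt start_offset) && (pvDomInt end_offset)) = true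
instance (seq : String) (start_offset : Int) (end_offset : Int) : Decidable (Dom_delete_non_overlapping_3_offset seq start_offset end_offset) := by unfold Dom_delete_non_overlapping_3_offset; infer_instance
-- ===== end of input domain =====

-- B replaces A's prefix/subseq/suffix decomposition and index-range comprehension with a
-- single sliding-window loop that consumes three characters at a time, maintaining the
-- accumulated prefix, remaining suffix and an output accumulator as state (objective: alternative); equal on Pre_.

-- ===== PORT A =====
-- Strings are ported on seq.toList via PySem.List.slice (exact for Python slicing) and rebuilt with String.ofList.
def pvADel (s : List Char) (count : Int) (offset : Int) : List (Int × List Char × List Char) :=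
  (PySem.List.pyRange offset (count * PySem.Int.floordiv ((s.length : Int) - offset) count) count).map
    (fun i => (i, PySem.List.slice s (some i) (some (i + count)),
               PySem.List.slice s none (some i) ++ PySem.List.slice s (some (i + count)) none))

def pvADel3 (s : List Char) : List (Int × List Char × List Char) := pvADel s 3 0

def delete_non_overlapping_3_offset (seq : String) (start_offset : Int) (end_offset : Int) :
    List (Int × String × String) :=
  if start_offset < 0 ∨ end_offset < 0 then []  -- Python raises ValueError here; excluded by Pre_
  else if start_offset = 0 ∧ end_offset = 0 then
    (pvADel3 seq.toList).map (fun e => (e.1, String.ofList e.2.1, String.ofList e.2.2))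
  else
    let s := seq.toList
    let prefix_ := PySem.List.slice s none (some start_offset)
    let p := if 0 < end_offset then
        (PySem.List.slice s (some (-end_offset)) none,
         PySem.List.slice s (some start_offset) (some (-end_offset)))
      else ([], PySem.List.slice s (some start_offset) none)
    (pvADel3 p.2).map (fun e =>
      (e.1 + start_offset, String.ofList e.2.1, String.ofList (prefix_ ++ e.2.2 ++ p.1)))

-- ===== PORT B =====
-- Source B's loop: steps counts remaining triplets; pref/rest/pos are the sliding-window state, out the accumulator.
def pvBloop : Nat → List Char → List Char → Int → List (Int × String × String) → List (Int × String × String)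
  | 0, _, _, _, out => out
  | steps + 1, pref, rest, pos, out =>
    let trip := PySem.List.slice rest none (some 3)
    pvBloop steps (pref ++ trip) (PySem.List.slice rest (some 3) none) (pos + 3)
      (out ++ [(pos, String.ofList trip, String.ofList (pref ++ PySem.List.slice rest (some 3) none))])

def delete_non_overlapping_3_offset_alt (seq : String) (start_offset : Int) (end_offset : Int) :
    List (Int × String × String) :=
  if start_offset < 0 ∨ end_offset < 0 then []  -- ValueError in Source B as well; excluded by Pre_
  else
    let s := seq.toList
    let steps := (PySem.Int.floordiv (max 0 ((s.length : Int) - start_offset - end_offset)) 3).toNat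
    pvBloop steps (PySem.List.slice s none (some start_offset))
            (PySem.List.slice s (some start_offset) none) start_offset []

-- ===== PRECONDITION & SPEC =====
-- A raises ValueError exactly when an offset is negative; those inputs are excluded.
def Pre_delete_non_overlapping_3_offset (seq : String) (start_offset : Int) (end_offset : Int) : Prop :=
  0 ≤ start_offset ∧ 0 ≤ end_offset
instance (seq : String) (start_offset : Int) (end_offset : Int) : Decidable (Pre_delete_non_overlapping_3_offset seq start_offset end_offset) := by unfold Pre_delete_non_overlapping_3_offset; infer_instance

def pvWitness_delete_non_overlapping_3_offset : String × Int × Int := ("ABCDEFGH", 1, 1)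

def Spec_delete_non_overlapping_3_offset (seq : String) (start_offset : Int) (end_offset : Int) (out : List (Int × String × String)) : Prop := out = delete_non_overlapping_3_offset_alt seq start_offset end_offset
instance (seq : String) (start_offset : Int) (end_offset : Int) (out : List (Int × String × String)) : Decidable (Spec_delete_non_overlapping_3_offset seq start_offset end_offset out) := by unfold Spec_delete_non_overlapping_3_offset; infer_instance

-- ===== CLAIM (what is proved, stated in full; the proofs are below) =====
def Claim_equal_delete_non_overlapping_3_offset : Prop := ∀ (seq : String) (start_offset : Int) (end_offset : Int), Dom_delete_non_overlapping_3_offset seq start_offset end_offset → Pre_delete_non_overlapping_3_offset seq start_offset end_offset → Spec_delete_non_overlapping_3_offset seq start_offset end_offset (delete_non_overlapping_3_offset seq start_offset end_offset)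

-- ===== LEMMAS AND PROOFS =====

-- canonical form both sides are reduced to
def pvCanon (s : List Char) (a' e' : Nat) : List (Int × String × String) :=
  (List.range ((s.length - a' - e') / 3)).map (fun k =>
    (((a' + 3 * k : Nat) : Int), String.ofList ((s.drop (a' + 3 * k)).take 3),
     String.ofList (s.take (a' + 3 * k) ++ s.drop (a' + 3 * k + 3))))

lemma pvPyRange3 (a : Int) (c : Nat) :
    PySem.List.pyRange a (a + 3 * (c : Int)) 3 = (List.range c).map (fun k : Nat => a + 3 * (k : Int)) := by
  rw [PySem.List.pyRange_of_pos _ _ (by norm_num : (0:Int) < 3)]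
  rcases Nat.eq_zero_or_pos c with hc | hc
  · subst hc; simp
  · have hlt : a < a + 3 * (c : Int) := by omega
    rw [if_pos hlt]
    have harg : (a + 3 * (c : Int) - a + 3 - 1) = ((3 * c + 2 : Nat) : Int) := by push_cast; ring
    have hdiv : ((3 * c + 2 : Nat) : Int) / 3 = (c : Int) := by
      rw [show (3:Int) = ((3:Nat):Int) by norm_num, ← Int.natCast_div]
      norm_cast; omega
    rw [harg, hdiv]
    simp

lemma pvFloordiv3 (m : Nat) : PySem.Int.floordiv (m : Int) 3 = ((m / 3 : Nat) : Int) := by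
  exact_mod_cast PySem.Int.floordiv_natCast m 3

-- B's loop unrolled: starting at window position j with accumulator out, step k appends the triple at j + 3*k.
lemma pvBloop_spec (s : List Char) (j : Nat) (steps : Nat) (out : List (Int × String × String)) :
    pvBloop steps (s.take j) (s.drop j) ((j : Nat) : Int) out =
      out ++ (List.range steps).map (fun k =>
        (((j + 3 * k : Nat) : Int), String.ofList ((s.drop (j + 3 * k)).take 3),
         String.ofList (s.take (j + 3 * k) ++ s.drop (j + 3 * k + 3)))) := by
  induction steps generalizing j out with
  | zero => simp [pvBloop]
  | succ n ih =>
    have hsl1 : ∀ xs : List Char, PySem.List.slice xs none (some 3) = xs.take 3 := fun xs => by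
      rw [show (3:Int) = ((3:Nat):Int) by norm_num, PySem.List.slice_to_natCast]
    have hsl2 : ∀ xs : List Char, PySem.List.slice xs (some 3) none = xs.drop 3 := fun xs => by
      rw [show (3:Int) = ((3:Nat):Int) by norm_num, PySem.List.slice_from_natCast]
    have htake : s.take j ++ (s.drop j).take 3 = s.take (j + 3) := List.take_add.symm
    have hdrop : (s.drop j).drop 3 = s.drop (j + 3) := by rw [List.drop_drop]
    have hpos : ((j : Nat) : Int) + 3 = ((j + 3 : Nat) : Int) := by push_cast; ring
    rw [List.range_succ_eq_map, List.map_cons, List.map_map]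
    unfold pvBloop
    dsimp only
    rw [hsl1, hsl2, htake, hdrop, hpos, ih (j + 3)]
    rw [List.append_assoc]
    congr 2
    rw [List.singleton_append]
    congr 1
    apply List.map_congr_left
    intro a _
    simp only [Function.comp, Nat.succ_eq_add_one]
    have h1 : j + 3 + 3 * a = j + 3 * (a + 1) := by omega
    rw [h1]

-- A's loop body in canonical form: prefix/subseq/suffix as drop/take of the original list
lemma pvCore (s : List Char) (a' e' : Nat) :
    (pvADel3 ((s.drop (min a' s.length)).take (s.length - e' - min a' s.length))).map
      (fun t => (t.1 + (a' : Int), String.ofList t.2.1,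
         String.ofList (s.take a' ++ t.2.2 ++ s.drop (s.length - e')))) = pvCanon s a' e' := by
  unfold pvADel3 pvADel pvCanon
  set m := min a' s.length with hm
  set L0 := s.length - e' - min a' s.length with hL0
  set sub := (s.drop m).take L0 with hsubdef
  have hlen : sub.length = s.length - a' - e' := by
    simp only [hsubdef, List.length_take, List.length_drop]
    omega
  rw [show ((sub.length : Int) - 0) = ((s.length - a' - e' : Nat) : Int) by rw [hlen]; ring,
    pvFloordiv3,
    show (3 * (((s.length - a' - e') / 3 : Nat) : Int)) = 0 + 3 * (((s.length - a' - e') / 3 : Nat) : Int) by ring,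
    pvPyRange3]
  simp only [List.map_map]
  apply List.map_congr_left
  intro k hk
  have hk3 : 3 * k + 3 ≤ s.length - a' - e' := by
    have := List.mem_range.mp hk
    omega
  have ha' : a' ≤ s.length := by omega
  have hmm : m = a' := by omega
  have hL0L : L0 = s.length - a' - e' := by omega
  simp only [Function.comp]
  have hi : ((0 : Int) + 3 * (k : Int)) = ((3 * k : Nat) : Int) := by push_cast; ring
  have hi3 : ((3 * k : Nat) : Int) + 3 = ((3 * k + 3 : Nat) : Int) := by push_cast; ring
  rw [hi, hi3, PySem.List.slice_natCast, PySem.List.slice_to_natCast, PySem.List.slice_from_natCast]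
  have h3 : 3 * k + 3 - 3 * k = 3 := by omega
  rw [h3]
  refine Prod.ext ?_ (Prod.ext ?_ ?_)
  · show ((3 * k : Nat) : Int) + (a' : Int) = ((a' + 3 * k : Nat) : Int)
    push_cast; ring
  · show String.ofList ((sub.drop (3 * k)).take 3) = String.ofList ((s.drop (a' + 3 * k)).take 3)
    congr 1
    rw [hsubdef, List.drop_take, List.drop_drop, List.take_take, hmm]
    congr 1
    omega
  · show String.ofList (s.take a' ++ (sub.take (3 * k) ++ sub.drop (3 * k + 3)) ++ s.drop (s.length - e'))
        = String.ofList (s.take (a' + 3 * k) ++ s.drop (a' + 3 * k + 3))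
    congr 1
    have htake : sub.take (3 * k) = (s.drop a').take (3 * k) := by
      rw [hsubdef, List.take_take, hmm]
      congr 1
      omega
    have hdrop : sub.drop (3 * k + 3) = (s.drop (a' + 3 * k + 3)).take (L0 - (3 * k + 3)) := by
      rw [hsubdef, List.drop_take, List.drop_drop, hmm]
      congr 2
    have hsuf : s.drop (s.length - e') = (s.drop (a' + 3 * k + 3)).drop (L0 - (3 * k + 3)) := by
      rw [List.drop_drop]
      congr 1
      omega
    rw [htake, hdrop, hsuf, List.take_add]
    conv_rhs => rw [← List.take_append_drop (L0 - (3 * k + 3)) (List.drop (a' + 3 * k + 3) s)]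
    simp [List.append_assoc]

lemma pvA_canon (seq : String) (a' e' : Nat) :
    delete_non_overlapping_3_offset seq (a' : Int) (e' : Int) = pvCanon seq.toList a' e' := by
  unfold delete_non_overlapping_3_offset
  rw [if_neg (by omega)]
  by_cases hz : (a' : Int) = 0 ∧ (e' : Int) = 0
  · obtain ⟨ha, he⟩ := hz
    have ha' : a' = 0 := by omega
    have he' : e' = 0 := by omega
    subst ha' he'
    rw [if_pos ⟨rfl, rfl⟩, ← pvCore seq.toList 0 0]
    have hsub : (seq.toList.drop (min 0 seq.toList.length)).take
        (seq.toList.length - 0 - min 0 seq.toList.length) = seq.toList := by simp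
    rw [hsub]
    apply List.map_congr_left
    intro t _
    have hnil : seq.toList.drop (seq.toList.length - 0) = ([] : List Char) := by
      rw [Nat.sub_zero]; exact List.drop_length
    rw [hnil]
    simp
  · rw [if_neg hz]
    dsimp only
    by_cases hep : (0 : Int) < (e' : Int)
    · rw [if_pos hep, ← pvCore seq.toList a' e']
      have he' : 0 < e' := by omega
      have hsub : PySem.List.slice seq.toList (some (a' : Int)) (some (-(e' : Int)))
          = (seq.toList.drop (min a' seq.toList.length)).take
              (seq.toList.length - e' - min a' seq.toList.length) := by
        show (seq.toList.drop (PySem.List.clampIdx seq.toList.length (a' : Int))).take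
            (PySem.List.clampIdx seq.toList.length (-(e' : Int))
              - PySem.List.clampIdx seq.toList.length (a' : Int)) = _
        rw [PySem.List.clampIdx_neg_natCast _ _ he', PySem.List.clampIdx_natCast]
      have hsuf : PySem.List.slice seq.toList (some (-(e' : Int))) none
          = seq.toList.drop (seq.toList.length - e') :=
        PySem.List.slice_from_neg_natCast _ _ he'
      rw [hsub, hsuf, PySem.List.slice_to_natCast]
    · rw [if_neg hep, ← pvCore seq.toList a' e']
      have he' : e' = 0 := by omega
      subst he'
      have hsub : PySem.List.slice seq.toList (some (a' : Int)) none
          = (seq.toList.drop (min a' seq.toList.length)).take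
              (seq.toList.length - 0 - min a' seq.toList.length) := by
        rw [PySem.List.slice_some_none, PySem.List.clampIdx_natCast,
          List.take_of_length_le (by simp)]
      rw [hsub, PySem.List.slice_to_natCast]
      apply List.map_congr_left
      intro t _
      have hnil : seq.toList.drop (seq.toList.length - 0) = ([] : List Char) := by
        rw [Nat.sub_zero]; exact List.drop_length
      rw [hnil]

lemma pvB_canon (seq : String) (a' e' : Nat) :
    delete_non_overlapping_3_offset_alt seq (a' : Int) (e' : Int) = pvCanon seq.toList a' e' := by
  unfold delete_non_overlapping_3_offset_alt
  rw [if_neg (by omega)]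
  dsimp only
  set s := seq.toList with hs
  have hmax : max 0 ((s.length : Int) - (a' : Int) - (e' : Int))
      = ((s.length - a' - e' : Nat) : Int) := by omega
  rw [hmax, pvFloordiv3, Int.toNat_natCast,
    PySem.List.slice_to_natCast, PySem.List.slice_from_natCast, pvBloop_spec]
  unfold pvCanon
  rfl

-- ===== VERDICT (by name: the statement is the Claim_ definition above) =====
theorem delete_non_overlapping_3_offset_spec : Claim_equal_delete_non_overlapping_3_offset := by
  intro seq a e _ hpre
  obtain ⟨ha, he⟩ := hpre
  unfold Spec_delete_non_overlapping_3_offset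
  obtain ⟨a', rfl⟩ : ∃ a' : Nat, (a' : Int) = a := ⟨a.toNat, Int.toNat_of_nonneg ha⟩
  obtain ⟨e', rfl⟩ : ∃ e' : Nat, (e' : Int) = e := ⟨e.toNat, Int.toNat_of_nonneg he⟩
  rw [pvB_canon, pvA_canon]
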